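-- pv_equiv track=rewrite | github.com/manojrohtela/ai-hub | backend/sales_agent/analyzer.py | _pick_primary_metric
-- ===== SOURCE A (Python) =====
-- from typing import Any, Dict, List, Optional, Tuple
--
-- METRIC_PRIORITY_KEYWORDS = (
--     "revenue",
--     "sales",
--     "profit",
--     "amount",
--     "value",
--     "spend",
--     "cost",
--     "price",
--     "units",
--     "quantity",
--     "count",
-- )
--
-- def _pick_primary_metric(columns: List[str]) -> Optional[str]:
--     if not columns:
--         return None
--
--     lowered = {column: column.lower() for column in columns}
--     for keyword in METRIC_PRIORITY_KEYWORDS: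
--         for column in columns:
--             if keyword in lowered[column]:
--                 return column
--
--     return columns[0]
-- ===== SOURCE B (Python) =====
-- METRIC_PRIORITY_KEYWORDS = (
--     "revenue",
--     "sales",
--     "profit",
--     "amount",
--     "value",
--     "spend",
--     "cost",
--     "price",
--     "units",
--     "quantity",
--     "count",
-- )
--
-- def _pick_primary_metric(columns):
--     # One pass over columns: keep the column whose best-matching keyword has the
--     # smallest priority index; strict '<' keeps the first column on ties.
--     if not columns:
--         return None
--     best = columns[0]
--     best_rank = len(METRIC_PRIORITY_KEYWORDS)
--     for column in columns:
--         low = column.lower()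
--         rank = next((i for i, kw in enumerate(METRIC_PRIORITY_KEYWORDS) if kw in low),
--                     len(METRIC_PRIORITY_KEYWORDS))
--         if rank < best_rank:
--             best = column
--             best_rank = rank
--     return best
-- ===== Notes on version B (the rewrite author's own statement) =====
-- stated objective: alternative
-- what changed: Replaces A's keyword-major nested scan (for each keyword, scan all columns, plus a precomputed lowercase dict) with a single column-major pass that computes each column's best keyword rank and keeps the column with the strictly smallest rank.
import Mathlib
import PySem

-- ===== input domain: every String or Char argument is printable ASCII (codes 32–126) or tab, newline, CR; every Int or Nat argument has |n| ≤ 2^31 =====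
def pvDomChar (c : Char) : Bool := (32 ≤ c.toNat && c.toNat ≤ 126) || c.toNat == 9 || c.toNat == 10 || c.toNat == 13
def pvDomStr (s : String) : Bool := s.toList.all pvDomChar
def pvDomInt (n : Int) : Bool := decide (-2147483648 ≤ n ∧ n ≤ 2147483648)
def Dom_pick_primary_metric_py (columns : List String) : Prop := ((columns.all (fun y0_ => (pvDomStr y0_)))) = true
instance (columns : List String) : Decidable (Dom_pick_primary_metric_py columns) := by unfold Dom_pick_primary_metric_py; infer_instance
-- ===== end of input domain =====

-- B replaces A's keyword-major nested scan with a single column-major pass keeping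
-- the column of strictly smallest keyword rank (alternative decomposition, same cost).

def metricKeywords : List String :=
  ["revenue", "sales", "profit", "amount", "value", "spend", "cost", "price",
   "units", "quantity", "count"]

-- ===== PORT A =====
-- inner 'for column in columns: if keyword in lowered[column]: return column'
def pickInner (lowered : PySem.Dict String String) (keyword : String) :
    List String → Option String
  | [] => none
  | c :: rest =>
    if PySem.Str.isIn keyword (lowered.getD c "") then some c
    else pickInner lowered keyword rest

-- outer 'for keyword in METRIC_PRIORITY_KEYWORDS: …'
def pickOuter (lowered : PySem.Dict String String) (columns : List String) :
    List String → Option String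
  | [] => none
  | k :: ks =>
    match pickInner lowered k columns with
    | some c => some c
    | none => pickOuter lowered columns ks

def pick_primary_metric_py (columns : List String) : Option String :=
  if columns = [] then none
  else
    let lowered := columns.foldl (fun d c => d.insert c (PySem.Str.lower c)) PySem.Dict.empty
    match pickOuter lowered columns metricKeywords with
    | some c => some c
    | none => PySem.List.pyGet? columns 0

-- ===== PORT B =====
-- rank of a column: index of the first keyword contained in its lowercase form
def colRank (column : String) : Nat :=
  metricKeywords.findIdx (fun kw => PySem.Str.isIn kw (PySem.Str.lower column))

def pick_primary_metric_py_alt (columns : List String) : Option String :=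
  match columns with
  | [] => none
  | c0 :: _ =>
    some ((columns.foldl
      (fun (best : String × Nat) column =>
        let r := colRank column
        if r < best.2 then (column, r) else best)
      (c0, metricKeywords.length)).1)

-- ===== PRECONDITION & SPEC =====
def Spec_pick_primary_metric_py (columns : List String) (out : Option String) : Prop := out = pick_primary_metric_py_alt columns
instance (columns : List String) (out : Option String) : Decidable (Spec_pick_primary_metric_py columns out) := by unfold Spec_pick_primary_metric_py; infer_instance

-- ===== CLAIM (what is proved, stated in full; the proofs are below) =====
def Claim_equal_pick_primary_metric_py : Prop := ∀ (columns : List String), Dom_pick_primary_metric_py columns → Spec_pick_primary_metric_py columns (pick_primary_metric_py columns)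

-- ===== LEMMAS AND PROOFS =====

-- keyword rank relative to an arbitrary keyword list (generalises colRank)
def rankOf (ks : List String) (c : String) : Nat :=
  ks.findIdx (fun kw => PySem.Str.isIn kw (PySem.Str.lower c))

theorem colRank_eq : colRank = rankOf metricKeywords := rfl

def natMin (t : Nat) (l : List Nat) : Nat := l.foldr min t

theorem natMin_cons (t x : Nat) (l : List Nat) :
    natMin t (x :: l) = min x (natMin t l) := rfl

theorem natMin_le_top (t : Nat) (l : List Nat) : natMin t l ≤ t := by
  induction l with
  | nil => simp [natMin]
  | cons x l ih => simp only [natMin_cons]; omega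

theorem natMin_le_mem (t : Nat) (l : List Nat) (x : Nat) (hx : x ∈ l) :
    natMin t l ≤ x := by
  induction l with
  | nil => cases hx
  | cons y l ih =>
    rcases List.mem_cons.mp hx with h | h
    · subst h; simp only [natMin_cons]; omega
    · have := ih h; simp only [natMin_cons]; omega

theorem natMin_mem (t : Nat) (l : List Nat) : natMin t l = t ∨ natMin t l ∈ l := by
  induction l with
  | nil => left; rfl
  | cons x l ih =>
    simp only [natMin_cons]
    rcases Nat.le_total x (natMin t l) with hle | hle
    · right; rw [Nat.min_eq_left hle]; exact List.mem_cons_self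
    · rw [Nat.min_eq_right hle]
      rcases ih with h | h
      · left; exact h
      · right; exact List.mem_cons_of_mem _ h

theorem natMin_succ (t : Nat) (l : List Nat) :
    natMin (t + 1) (l.map (· + 1)) = natMin t l + 1 := by
  induction l with
  | nil => rfl
  | cons x l ih => simp only [List.map_cons, natMin_cons, ih]; omega

theorem natMin_min (a b : Nat) (l : List Nat) :
    natMin (min a b) l = min a (natMin b l) := by
  induction l with
  | nil => rfl
  | cons x l ih => simp only [natMin_cons, ih]; omega

theorem rankOf_cons (k : String) (ks : List String) (c : String) :
    rankOf (k :: ks) c =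
      if PySem.Str.isIn k (PySem.Str.lower c) then 0 else rankOf ks c + 1 := by
  simp [rankOf, List.findIdx_cons, Bool.cond_eq_ite]

theorem find?_congr_mem {α : Type} (p q : α → Bool) (l : List α)
    (h : ∀ x ∈ l, p x = q x) : l.find? p = l.find? q := by
  induction l with
  | nil => rfl
  | cons x l ih =>
    have hx := h x List.mem_cons_self
    by_cases hp : p x = true
    · rw [List.find?_cons_of_pos hp, List.find?_cons_of_pos (hx ▸ hp)]
    · rw [List.find?_cons_of_neg hp, List.find?_cons_of_neg (by rw [← hx]; exact hp)]
      exact ih (fun y hy => h y (List.mem_cons_of_mem _ hy))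

-- the dict comprehension maps every column to its lowercase form
theorem lowered_get? (cs : List String) (d : PySem.Dict String String) (c : String)
    (h : d.get? c = some (PySem.Str.lower c) ∨ c ∈ cs) :
    (cs.foldl (fun d c => d.insert c (PySem.Str.lower c)) d).get? c
      = some (PySem.Str.lower c) := by
  induction cs generalizing d with
  | nil => simpa using h.resolve_right (by simp)
  | cons c0 cs ih =>
    simp only [List.foldl_cons]
    apply ih
    by_cases hc : c = c0
    · subst hc; left; exact PySem.Dict.get?_insert_self _ _ _
    · rcases h with h | h
      · left; rw [PySem.Dict.get?_insert_of_ne _ _ hc]; exact h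
      · rcases List.mem_cons.mp h with h' | h'
        · exact absurd h' hc
        · right; exact h'

theorem lowered_getD (cs : List String) (c : String) (hc : c ∈ cs) :
    (cs.foldl (fun d c => d.insert c (PySem.Str.lower c)) PySem.Dict.empty).getD c ""
      = PySem.Str.lower c :=
  PySem.Dict.getD_of_get?_eq_some _ _ (lowered_get? cs _ c (Or.inr hc))

-- the inner loop is a first-match scan
theorem pickInner_eq_find? (lowered : PySem.Dict String String) (k : String)
    (cs : List String) (h : ∀ c ∈ cs, lowered.getD c "" = PySem.Str.lower c) :
    pickInner lowered k cs = cs.find? (fun c => PySem.Str.isIn k (PySem.Str.lower c)) := by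
  induction cs with
  | nil => rfl
  | cons c cs ih =>
    have hc := h c List.mem_cons_self
    rw [pickInner, hc]
    by_cases hp : PySem.Str.isIn k (PySem.Str.lower c) = true
    · rw [if_pos hp,
        List.find?_cons_of_pos (p := fun c => PySem.Str.isIn k (PySem.Str.lower c)) hp]
    · rw [if_neg hp,
        List.find?_cons_of_neg (p := fun c => PySem.Str.isIn k (PySem.Str.lower c)) hp,
        ih (fun c' hc' => h c' (List.mem_cons_of_mem _ hc'))]

-- characterisation of A's keyword-major scan: first column achieving the minimal rank
theorem pickOuter_char (ks : List String) (lowered : PySem.Dict String String)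
    (cs : List String) (h : ∀ c ∈ cs, lowered.getD c "" = PySem.Str.lower c) :
    pickOuter lowered cs ks =
      if natMin ks.length (cs.map (rankOf ks)) < ks.length then
        cs.find? (fun c => rankOf ks c == natMin ks.length (cs.map (rankOf ks)))
      else none := by
  induction ks with
  | nil =>
    have h0 : ¬ natMin ([] : List String).length (cs.map (rankOf [])) <
        ([] : List String).length := by
      simp
    rw [if_neg h0]
    rfl
  | cons k ks ih =>
    rw [pickOuter, pickInner_eq_find? lowered k cs h]
    cases hf : cs.find? (fun c => PySem.Str.isIn k (PySem.Str.lower c)) with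
    | some c =>
      have hmem := List.mem_of_find?_eq_some hf
      have hp : PySem.Str.isIn k (PySem.Str.lower c) = true :=
        List.find?_some (p := fun c => PySem.Str.isIn k (PySem.Str.lower c)) hf
      have hr : rankOf (k :: ks) c = 0 := by rw [rankOf_cons, if_pos hp]
      have hmin0 : natMin (k :: ks).length (cs.map (rankOf (k :: ks))) = 0 := by
        have := natMin_le_mem (k :: ks).length (cs.map (rankOf (k :: ks)))
          (rankOf (k :: ks) c) (List.mem_map_of_mem hmem)
        omega
      rw [hmin0, if_pos (by simp)]
      show some c = _
      rw [← hf]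
      apply find?_congr_mem
      intro c' _
      by_cases hp' : PySem.Str.isIn k (PySem.Str.lower c') = true
      · rw [rankOf_cons, if_pos hp', hp']
        rfl
      · rw [rankOf_cons, if_neg hp']
        simp only [Bool.not_eq_true] at hp'
        rw [hp']
        rfl
    | none =>
      have hrank : ∀ c ∈ cs, rankOf (k :: ks) c = rankOf ks c + 1 := by
        intro c hc
        rw [rankOf_cons, if_neg (List.find?_eq_none.mp hf c hc)]
      have hmap : cs.map (rankOf (k :: ks)) = (cs.map (rankOf ks)).map (· + 1) := by
        rw [List.map_map]
        exact List.map_congr_left (fun c hc => hrank c hc)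
      have hlen : (k :: ks).length = ks.length + 1 := rfl
      simp only [hmap, hlen, natMin_succ]
      rw [ih]
      by_cases hlt : natMin ks.length (cs.map (rankOf ks)) < ks.length
      · rw [if_pos hlt, if_pos (by omega)]
        apply find?_congr_mem
        intro c hc
        rw [hrank c hc]
        simp
      · rw [if_neg hlt, if_neg (by omega)]

-- characterisation of B's single-pass strict-min fold
theorem fold_char (cs : List String) (b : String) (rb : Nat) :
    cs.foldl
      (fun (best : String × Nat) column =>
        if colRank column < best.2 then (column, colRank column) else best)
      (b, rb)
    = (if natMin rb (cs.map colRank) < rb then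
         (cs.find? (fun c => colRank c == natMin rb (cs.map colRank))).getD b
       else b,
       natMin rb (cs.map colRank)) := by
  induction cs generalizing b rb with
  | nil =>
    simp only [List.foldl_nil, List.map_nil]
    rw [if_neg (by simp [natMin])]
    rfl
  | cons c cs ih =>
    have hMle : natMin rb (cs.map colRank) ≤ rb := natMin_le_top _ _
    simp only [List.foldl_cons, List.map_cons, natMin_cons]
    by_cases hr : colRank c < rb
    · rw [if_pos hr, ih c (colRank c)]
      have hM : natMin (colRank c) (cs.map colRank)
          = min (colRank c) (natMin rb (cs.map colRank)) := by
        rw [← natMin_min, Nat.min_eq_left (Nat.le_of_lt hr)]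
      simp only [hM]
      rw [if_pos (show min (colRank c) (natMin rb (cs.map colRank)) < rb by omega)]
      by_cases hlt : min (colRank c) (natMin rb (cs.map colRank)) < colRank c
      · rw [if_pos hlt]
        have hmin : min (colRank c) (natMin rb (cs.map colRank))
            = natMin rb (cs.map colRank) := by omega
        rw [List.find?_cons_of_neg (by simp only [beq_iff_eq]; omega)]
        have hmem : natMin rb (cs.map colRank) ∈ cs.map colRank := by
          rcases natMin_mem rb (cs.map colRank) with h0 | h0
          · omega
          · exact h0
        rcases List.mem_map.mp hmem with ⟨c', hc', hc'eq⟩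
        have hs : (cs.find? (fun x =>
            colRank x == min (colRank c) (natMin rb (cs.map colRank)))).isSome := by
          rw [List.find?_isSome]
          exact ⟨c', hc', by simp only [beq_iff_eq]; omega⟩
        rcases Option.isSome_iff_exists.mp hs with ⟨y, hy⟩
        simp [hy]
      · rw [if_neg hlt,
          List.find?_cons_of_pos (by simp only [beq_iff_eq]; omega)]
        rfl
    · rw [if_neg hr, ih b rb]
      have hM : min (colRank c) (natMin rb (cs.map colRank))
          = natMin rb (cs.map colRank) := by omega
      simp only [hM]
      by_cases hlt : natMin rb (cs.map colRank) < rb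
      · rw [if_pos hlt, if_pos hlt,
          List.find?_cons_of_neg (by simp only [beq_iff_eq]; omega)]
      · rw [if_neg hlt, if_neg hlt]

-- ===== VERDICT (by name: the statement is the Claim_ definition above) =====
theorem pick_primary_metric_py_spec : Claim_equal_pick_primary_metric_py := by
  intro columns _
  unfold Spec_pick_primary_metric_py
  cases columns with
  | nil => rfl
  | cons c0 rest =>
    have hgetD : ∀ c ∈ c0 :: rest,
        ((c0 :: rest).foldl (fun d c => d.insert c (PySem.Str.lower c))
          PySem.Dict.empty).getD c "" = PySem.Str.lower c :=
      fun c hc => lowered_getD _ c hc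
    simp only [pick_primary_metric_py, pick_primary_metric_py_alt]
    rw [if_neg (List.cons_ne_nil c0 rest)]
    rw [pickOuter_char metricKeywords _ (c0 :: rest) hgetD,
      fold_char (c0 :: rest) c0 metricKeywords.length]
    rw [colRank_eq]
    by_cases hlt : natMin metricKeywords.length
        ((c0 :: rest).map (rankOf metricKeywords)) < metricKeywords.length
    · rw [if_pos hlt, if_pos hlt]
      have hmem : natMin metricKeywords.length ((c0 :: rest).map (rankOf metricKeywords))
          ∈ (c0 :: rest).map (rankOf metricKeywords) := by
        rcases natMin_mem metricKeywords.length
          ((c0 :: rest).map (rankOf metricKeywords)) with h0 | h0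
        · omega
        · exact h0
      rcases List.mem_map.mp hmem with ⟨c', hc', hc'eq⟩
      have hs : ((c0 :: rest).find? (fun x => rankOf metricKeywords x
          == natMin metricKeywords.length
              ((c0 :: rest).map (rankOf metricKeywords)))).isSome := by
        rw [List.find?_isSome]
        exact ⟨c', hc', by simp [hc'eq]⟩
      rcases Option.isSome_iff_exists.mp hs with ⟨y, hy⟩
      rw [hy]
      rfl
    · rw [if_neg hlt, if_neg hlt]
      simp [PySem.List.pyGet?, PySem.List.pyIdx?]
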